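-- pv_equiv track=rewrite | github.com/YosysHQ/icestorm | icebox/icebox.py | get_lutff_bits
-- ===== SOURCE A (Python) =====
-- def get_lutff_bits(tile, index):
--     bits = list("--------------------")
--     for k, line in enumerate(tile):
--         for i in range(36, 46):
--             lutff_idx = k // 2
--             lutff_bitnum = (i-36) + 10*(k%2)
--             if lutff_idx == index:
--                 bits[lutff_bitnum] = line[i];
--     return bits
-- ===== SOURCE B (Python) =====
-- def get_lutff_bits(tile, index):
--     bits = list('-' * 20)
--     for half in (0, 1):
--         k = 2 * index + half
--         if 0 <= k < len(tile):
--             bits[10 * half : 10 * half + 10] = tile[k][36:46]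
--     return bits
-- ===== Notes on version B (the rewrite author's own statement) =====
-- stated objective: simpler
-- what changed: Instead of scanning every row of the tile and recomputing k//2 and the bit position per cell, B indexes only the two relevant rows 2*index and 2*index+1 and copies each row's slice [36:46] into the bit list with one slice assignment.
import Mathlib
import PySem

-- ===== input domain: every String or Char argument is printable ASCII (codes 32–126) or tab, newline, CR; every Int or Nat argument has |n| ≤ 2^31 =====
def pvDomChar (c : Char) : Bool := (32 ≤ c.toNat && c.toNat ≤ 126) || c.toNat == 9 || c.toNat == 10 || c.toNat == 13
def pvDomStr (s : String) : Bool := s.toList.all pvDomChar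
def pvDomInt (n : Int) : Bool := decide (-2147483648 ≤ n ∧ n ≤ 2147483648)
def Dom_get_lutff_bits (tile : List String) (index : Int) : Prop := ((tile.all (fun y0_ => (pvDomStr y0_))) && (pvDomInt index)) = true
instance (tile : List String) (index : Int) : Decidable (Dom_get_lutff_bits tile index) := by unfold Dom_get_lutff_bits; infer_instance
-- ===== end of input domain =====

-- B replaces A's scan over every tile row (with per-cell k//2 / bit-position arithmetic) by
-- directly indexing the two relevant rows 2*index and 2*index+1 and copying each row's
-- slice [36:46] into the bit list in one splice; objective: simpler.

-- ===== PORT A =====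
def get_lutff_bits (tile : List String) (index : Int) : List String :=
  (PySem.List.enumerate tile).foldl (fun bits kl =>
    (PySem.List.pyRange 36 46 1).foldl (fun bs i =>
      if PySem.Int.floordiv kl.1 2 = index then
        PySem.List.pySetD bs ((i - 36) + 10 * PySem.Int.mod kl.1 2)
          (match PySem.Str.pyGet? kl.2 i with
           | some c => String.ofList [c]
           | none => "?")   -- Python raises IndexError here; excluded by Pre_
      else bs) bits)
    (List.replicate 20 "-")

-- ===== PORT B =====
def get_lutff_bits_alt (tile : List String) (index : Int) : List String :=
  ([0, 1] : List Int).foldl (fun bits half =>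
    let k := 2 * index + half
    if 0 ≤ k ∧ k < (tile.length : Int) then
      bits.take (10 * half).toNat
        ++ (PySem.Str.slice (PySem.List.pyGetD tile k "") (some 36) (some 46)).toList.map
             (fun c => String.ofList [c])
        ++ bits.drop (10 * half + 10).toNat
    else bits)
    (List.replicate 20 "-")

-- ===== PRECONDITION & SPEC =====
-- Pre_ excludes exactly the inputs on which A raises IndexError: a row 2*index or
-- 2*index+1 that exists but is shorter than 46 characters.
def Pre_get_lutff_bits (tile : List String) (index : Int) : Prop :=
  ∀ (k : Nat) (h : k < tile.length),
    ((k : Int) = 2 * index ∨ (k : Int) = 2 * index + 1) → 46 ≤ (tile[k]'h).toList.length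
instance (tile : List String) (index : Int) : Decidable (Pre_get_lutff_bits tile index) := by
  unfold Pre_get_lutff_bits; infer_instance

def pvWitness_get_lutff_bits : List String × Int :=
  (["0123456789012345678901234567890123456789012345"], 0)

def Spec_get_lutff_bits (tile : List String) (index : Int) (out : List String) : Prop := out = get_lutff_bits_alt tile index
instance (tile : List String) (index : Int) (out : List String) : Decidable (Spec_get_lutff_bits tile index out) := by unfold Spec_get_lutff_bits; infer_instance

-- ===== CLAIM (what is proved, stated in full; the proofs are below) =====
def Claim_equal_get_lutff_bits : Prop := ∀ (tile : List String) (index : Int), Dom_get_lutff_bits tile index → Pre_get_lutff_bits tile index → Spec_get_lutff_bits tile index (get_lutff_bits tile index)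

-- ===== LEMMAS AND PROOFS =====

-- one row of A's outer loop (definitionally the body of the port's fold)
def rowA (index : Int) (bits : List String) (k : Int) (line : String) : List String :=
  (PySem.List.pyRange 36 46 1).foldl (fun bs i =>
    if PySem.Int.floordiv k 2 = index then
      PySem.List.pySetD bs ((i - 36) + 10 * PySem.Int.mod k 2)
        (match PySem.Str.pyGet? line i with
         | some c => String.ofList [c]
         | none => "?")
    else bs) bits

lemma foldl_id {α β : Type} (l : List α) (bs : β) : l.foldl (fun b _ => b) bs = bs := by
  induction l generalizing bs with
  | nil => rfl
  | cons x xs ih =>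
    simp only [List.foldl_cons]
    exact ih bs

lemma rowA_noop {index k : Int} (h : ¬ PySem.Int.floordiv k 2 = index)
    (bits : List String) (line : String) : rowA index bits k line = bits := by
  unfold rowA
  simp only [h, if_false]
  exact foldl_id _ _

lemma rowA_length (index : Int) (bits : List String) (k : Int) (line : String) :
    (rowA index bits k line).length = bits.length := by
  unfold rowA
  generalize PySem.List.pyRange 36 46 1 = l
  induction l generalizing bits with
  | nil => rfl
  | cons i l ih =>
    simp only [List.foldl_cons]
    rw [ih]
    split_ifs
    · rw [PySem.List.length_pySetD]
    · rfl

-- the effect on bits of the (at most one) row of l at absolute position k, rows counted from n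
def applyK (index : Int) (l : List String) (n k : Int) (bits : List String) : List String :=
  if h : 0 ≤ k - n ∧ (k - n).toNat < l.length then rowA index bits k (l[(k - n).toNat]'h.2)
  else bits

lemma applyK_length (index : Int) (l : List String) (n k : Int) (bits : List String) :
    (applyK index l n k bits).length = bits.length := by
  unfold applyK
  split
  · rw [rowA_length]
  · rfl

lemma applyK_lt (index : Int) (l : List String) (n k : Int) (h : k < n) (bits : List String) :
    applyK index l n k bits = bits := by
  unfold applyK
  rw [dif_neg]
  omega

lemma applyK_cons_self (index : Int) (x : String) (xs : List String) (n : Int)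
    (bits : List String) : applyK index (x :: xs) n n bits = rowA index bits n x := by
  unfold applyK
  have h : 0 ≤ n - n ∧ (n - n).toNat < (x :: xs).length := by
    constructor <;> simp
  rw [dif_pos h]
  congr 1
  simp

lemma applyK_cons_ne (index : Int) (x : String) (xs : List String) (n k : Int)
    (h : k ≠ n) (bits : List String) :
    applyK index (x :: xs) n k bits = applyK index xs (n + 1) k bits := by
  unfold applyK
  by_cases h1 : 0 ≤ k - n ∧ (k - n).toNat < (x :: xs).length
  · have hlen : (x :: xs).length = xs.length + 1 := by simp
    have h2 : 0 ≤ k - (n + 1) ∧ (k - (n + 1)).toNat < xs.length := by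
      constructor <;> omega
    rw [dif_pos h1, dif_pos h2]
    congr 1
    have h3 : (k - n).toNat = (k - (n + 1)).toNat + 1 := by omega
    apply Option.some.inj
    rw [← List.getElem?_eq_getElem h1.2, ← List.getElem?_eq_getElem h2.2, h3,
      List.getElem?_cons_succ]
  · have hlen : (x :: xs).length = xs.length + 1 := by simp
    rw [dif_neg h1, dif_neg (by intro h2; exact h1 ⟨by omega, by omega⟩)]

lemma foldA_closed (index : Int) : ∀ (l : List String) (n : Int) (bits : List String),
    List.foldl (fun bs (p : Int × String) => rowA index bs p.1 p.2) bits (PySem.List.enumerate l n)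
      = applyK index l n (2 * index + 1) (applyK index l n (2 * index) bits) := by
  intro l
  induction l with
  | nil =>
    intro n bits
    simp [PySem.List.enumerate, applyK]
  | cons x xs ih =>
    intro n bits
    rw [PySem.List.enumerate_cons, List.foldl_cons, ih]
    by_cases h0 : n = 2 * index
    · subst h0
      rw [applyK_lt index xs (2 * index + 1) (2 * index) (by omega),
        applyK_cons_self index x xs (2 * index) bits,
        applyK_cons_ne index x xs (2 * index) (2 * index + 1) (by omega)]
    · by_cases h1 : n = 2 * index + 1
      · subst h1
        rw [applyK_lt index xs (2 * index + 1 + 1) (2 * index) (by omega),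
          applyK_lt index xs (2 * index + 1 + 1) (2 * index + 1) (by omega),
          applyK_cons_ne index x xs (2 * index + 1) (2 * index) (by omega),
          applyK_lt index xs (2 * index + 1 + 1) (2 * index) (by omega),
          applyK_cons_self index x xs (2 * index + 1) bits]
      · have hno : rowA index bits n x = bits := by
          apply rowA_noop
          intro he
          rw [PySem.Int.floordiv_eq_iff_of_pos (by norm_num)] at he
          omega
        rw [hno, applyK_cons_ne index x xs n (2 * index) (by omega),
          applyK_cons_ne index x xs n (2 * index + 1) (by omega)]

-- write vs at consecutive positions o, o+1, …
def setRun {α : Type} : List α → Nat → List α → List α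
  | bits, _, [] => bits
  | bits, o, v :: vs => setRun (bits.set o v) (o + 1) vs

lemma take_succ_set {α : Type} : ∀ (l : List α) (o : Nat) (v : α), o < l.length →
    (l.set o v).take (o + 1) = l.take o ++ [v]
  | [], o, v, h => by simp at h
  | x :: xs, 0, v, _ => by simp
  | x :: xs, o + 1, v, h => by
    simp only [List.set_cons_succ, List.take_succ_cons]
    rw [take_succ_set xs o v (by simpa using h)]
    rfl

lemma drop_set_high {α : Type} : ∀ (l : List α) (o m : Nat) (v : α), o < m →
    (l.set o v).drop m = l.drop m
  | [], _, _, _, _ => by simp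
  | x :: xs, 0, m, v, h => by
    obtain ⟨m', rfl⟩ : ∃ m', m = m' + 1 := ⟨m - 1, by omega⟩
    simp
  | x :: xs, o + 1, m, v, h => by
    obtain ⟨m', rfl⟩ : ∃ m', m = m' + 1 := ⟨m - 1, by omega⟩
    simp only [List.set_cons_succ, List.drop_succ_cons]
    exact drop_set_high xs o m' v (by omega)

lemma setRun_eq_splice {α : Type} : ∀ (vs bits : List α) (o : Nat),
    o + vs.length ≤ bits.length →
    setRun bits o vs = bits.take o ++ vs ++ bits.drop (o + vs.length)
  | [], bits, o, h => by simp [setRun]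
  | v :: vs, bits, o, h => by
    have hlen : o < bits.length := by simp at h; omega
    simp only [setRun]
    rw [setRun_eq_splice vs (bits.set o v) (o + 1) (by simp; simp at h; omega)]
    rw [take_succ_set bits o v hlen, drop_set_high bits o (o + 1 + vs.length) v (by omega)]
    have : o + 1 + vs.length = o + (v :: vs).length := by simp; omega
    rw [this]
    simp [List.append_assoc]

lemma foldl_range_set {α : Type} (b : Int) (c : Int → α) :
    ∀ (n : Nat) (a o : Int), (b - a).toNat = n → 0 ≤ o → ∀ (bits : List α),
    (PySem.List.pyRange a b 1).foldl (fun bs i => bs.set ((i - a) + o).toNat (c i)) bits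
      = setRun bits o.toNat ((PySem.List.pyRange a b 1).map c)
  | 0, a, o, hn, ho, bits => by
    have hba : b ≤ a := by omega
    simp [PySem.List.pyRange_one_eq_nil hba, setRun]
  | n + 1, a, o, hn, ho, bits => by
    have hab : a < b := by omega
    rw [PySem.List.pyRange_one_cons hab]
    simp only [List.foldl_cons, List.map_cons]
    have h1 : ((a - a) + o).toNat = o.toNat := by omega
    rw [h1]
    rw [PySem.List.foldl_congr_mem _ _
      (fun bs i => bs.set ((i - (a + 1)) + (o + 1)).toNat (c i)) _
      (by
        intro acc x hx
        have hx' := (PySem.List.mem_pyRange_one.mp hx).1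
        have : (x - a) + o = (x - (a + 1)) + (o + 1) := by ring
        rw [this])]
    rw [foldl_range_set b c n (a + 1) (o + 1) (by omega) (by omega)]
    have h2 : (o + 1).toNat = o.toNat + 1 := by omega
    rw [h2]
    rfl

lemma map_range_eq_seg (line : String) (hl : 46 ≤ line.toList.length) :
    (PySem.List.pyRange 36 46 1).map (fun i =>
        match PySem.Str.pyGet? line i with
        | some c => String.ofList [c]
        | none => "?")
      = (PySem.Str.slice line (some 36) (some 46)).toList.map (fun c => String.ofList [c]) := by
  have e1 : Int.toNat 46 - Int.toNat 36 = 10 := by decide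
  have e2 : Int.toNat 36 = 36 := by decide
  have hs : (PySem.Str.slice line (some 36) (some 46)).toList
      = (line.toList.drop 36).take 10 := by
    simp [PySem.Str.slice]
    rw [PySem.List.slice_toNat line.toList (by norm_num) (by norm_num), e1, e2]
  rw [hs]
  apply List.ext_getElem
  · simp only [List.length_map, PySem.List.length_pyRange_one, List.length_take,
      List.length_drop]
    omega
  · intro j h1 h2
    have hj : j < 10 := by
      simp only [List.length_map, PySem.List.length_pyRange_one] at h1
      omega
    simp only [List.getElem_map, PySem.List.getElem_pyRange_one, List.getElem_take,
      List.getElem_drop]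
    have hcast : (36 : Int) + (j : Int) = ((36 + j : Nat) : Int) := by push_cast; ring
    rw [hcast, PySem.Str.pyGet?_natCast]
    rw [List.getElem?_eq_getElem (by omega)]

lemma rowA_splice (index half : Int) (hh : half = 0 ∨ half = 1) (bits : List String)
    (hb : bits.length = 20) (line : String) (hl : 46 ≤ line.toList.length) :
    rowA index bits (2 * index + half) line
      = bits.take (10 * half).toNat
        ++ (PySem.Str.slice line (some 36) (some 46)).toList.map (fun c => String.ofList [c])
        ++ bits.drop (10 * half + 10).toNat := by
  have hfd : PySem.Int.floordiv (2 * index + half) 2 = index := by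
    rw [PySem.Int.floordiv_eq_iff_of_pos (by norm_num)]
    rcases hh with h | h <;> subst h <;> omega
  have hmd : PySem.Int.mod (2 * index + half) 2 = half := by
    have := PySem.Int.floordiv_mul_add_mod (2 * index + half) 2
    rw [hfd] at this
    omega
  unfold rowA
  simp only [hfd, hmd, if_true]
  rw [PySem.List.foldl_congr_mem _ _
    (fun bs i => bs.set ((i - 36) + 10 * half).toNat
      (match PySem.Str.pyGet? line i with
       | some c => String.ofList [c]
       | none => "?")) _
    (by
      intro acc x hx
      have hx' := PySem.List.mem_pyRange_one.mp hx
      have hnn : (0 : Int) ≤ (x - 36) + 10 * half := by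
        rcases hh with h | h <;> subst h <;> omega
      exact PySem.List.pySetD_of_nonneg _ _ hnn)]
  have hlen10 : ((PySem.List.pyRange 36 46 1).map (fun i =>
      match PySem.Str.pyGet? line i with
      | some c => String.ofList [c]
      | none => "?")).length = 10 := by
    simp only [List.length_map, PySem.List.length_pyRange_one]
    decide
  rw [foldl_range_set 46 _ 10 36 (10 * half) (by decide)
    (by rcases hh with h | h <;> subst h <;> omega)]
  rw [setRun_eq_splice _ _ _ (by
    rw [hlen10, hb]
    rcases hh with h | h <;> subst h <;> decide)]
  rw [hlen10]
  have hdd : (10 * half).toNat + 10 = (10 * half + 10).toNat := by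
    rcases hh with h | h <;> subst h <;> decide
  rw [hdd, map_range_eq_seg line hl]

lemma applyK_step (index half k : Int) (hh : half = 0 ∨ half = 1)
    (hk : k = 2 * index + half) (tile : List String)
    (hpre : Pre_get_lutff_bits tile index) (bits : List String) (hb : bits.length = 20) :
    applyK index tile 0 k bits
      = if 0 ≤ k ∧ k < (tile.length : Int) then
          bits.take (10 * half).toNat
            ++ (PySem.Str.slice (PySem.List.pyGetD tile k "") (some 36) (some 46)).toList.map
                 (fun c => String.ofList [c])
            ++ bits.drop (10 * half + 10).toNat
        else bits := by
  subst hk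
  unfold applyK
  simp only [sub_zero]
  by_cases hc : 0 ≤ 2 * index + half ∧ 2 * index + half < (tile.length : Int)
  · have hcond : 0 ≤ 2 * index + half ∧ (2 * index + half).toNat < tile.length := by
      constructor <;> omega
    rw [dif_pos hcond, if_pos hc]
    have hl : 46 ≤ (tile[(2 * index + half).toNat]'hcond.2).toList.length := by
      apply hpre (2 * index + half).toNat hcond.2
      rcases hh with h | h <;> subst h <;> [left; right] <;> omega
    rw [rowA_splice index half hh bits hb _ hl,
      PySem.List.pyGetD_eq_getElem tile "" hc.1 hc.2]
  · rw [dif_neg (by intro h; exact hc ⟨by omega, by omega⟩), if_neg hc]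

lemma key (tile : List String) (index : Int) (hpre : Pre_get_lutff_bits tile index) :
    get_lutff_bits tile index = get_lutff_bits_alt tile index := by
  have hA : get_lutff_bits tile index
      = List.foldl (fun bs (p : Int × String) => rowA index bs p.1 p.2)
          (List.replicate 20 "-") (PySem.List.enumerate tile 0) := rfl
  have hl0 : (List.replicate 20 ("-" : String)).length = 20 := by simp
  rw [hA, foldA_closed]
  rw [applyK_step index 1 (2 * index + 1) (Or.inr rfl) (by ring) tile hpre _
    (by rw [applyK_length]; exact hl0)]
  rw [applyK_step index 0 (2 * index) (Or.inl rfl) (by ring) tile hpre _ hl0]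
  unfold get_lutff_bits_alt
  simp only [List.foldl_cons, List.foldl_nil]
  norm_num

-- ===== VERDICT (by name: the statement is the Claim_ definition above) =====
theorem get_lutff_bits_spec : Claim_equal_get_lutff_bits := by
  intro tile index _ hpre
  unfold Spec_get_lutff_bits
  exact key tile index hpre
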